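-- pv_equiv track=rewrite | github.com/rahuljjacob/Typex | rotors_stators.py | reverse_shift_dictionary_values
-- ===== SOURCE A (Python) =====
-- def reverse_shift_dictionary_values(d):
--     if not d:
--         return {}
--
--     keys = list(d.keys())
--     values = list(d.values())
--     shifted_values = [values[-1]] + values[:-1]
--     shifted_dict = {keys[i]: shifted_values[i] for i in range(len(keys))}
--
--     return shifted_dict
-- ===== SOURCE B (Python) =====
-- def reverse_shift_dictionary_values(d):
--     if not d:
--         return {}
--     result = {}
--     prev = next(reversed(d.values()))
--     for k, v in d.items():
--         result[k] = prev
--         prev = v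
--     return result
-- ===== Notes on version B (the rewrite author's own statement) =====
-- stated objective: simpler
-- what changed: Instead of materialising keys/values lists, slicing values into a rotated copy and rebuilding the dict by index, B makes one pass over d.items() threading a single carried value (seeded with the last value) into the result dict.
import Mathlib
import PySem

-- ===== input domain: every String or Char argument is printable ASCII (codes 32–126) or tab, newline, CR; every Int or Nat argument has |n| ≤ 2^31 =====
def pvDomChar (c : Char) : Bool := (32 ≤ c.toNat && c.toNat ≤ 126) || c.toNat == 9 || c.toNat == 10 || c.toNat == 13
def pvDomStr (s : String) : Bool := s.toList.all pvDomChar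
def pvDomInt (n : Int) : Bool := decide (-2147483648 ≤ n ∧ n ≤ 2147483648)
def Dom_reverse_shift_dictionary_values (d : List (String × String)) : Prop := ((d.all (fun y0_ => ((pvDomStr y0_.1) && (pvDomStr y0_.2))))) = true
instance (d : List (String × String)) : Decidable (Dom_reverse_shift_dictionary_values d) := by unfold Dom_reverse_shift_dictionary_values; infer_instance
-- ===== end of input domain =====

-- B rotates the dict's values by threading one carried value ('prev') through a single
-- pass over the items, instead of A's building of keys/values lists, slicing, and an
-- index-based dict comprehension.  Objective: simpler (same O(n) cost).

-- ===== PORT A =====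
def reverse_shift_dictionary_values (d : List (String × String)) : List (String × String) :=
  if d = [] then []
  else
    let keys := d.map Prod.fst
    let values := d.map Prod.snd
    -- values[-1] via pyGet?; the none branch is unreachable (d ≠ [] here)
    let shifted := (match PySem.List.pyGet? values (-1) with
                    | some v => [v]
                    | none => []) ++ PySem.List.slice values none (some (-1))
    -- the dict comprehension: keys come from a Python dict, hence are distinct, so the
    -- built dict's items are exactly the pairs (keys[i], shifted[i]) in index order
    (PySem.List.pyRange 0 (keys.length : Int) 1).map
      (fun i => (PySem.List.pyGetD keys i "", PySem.List.pyGetD shifted i ""))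

-- ===== PORT B =====
def reverse_shift_dictionary_values_alt (d : List (String × String)) : List (String × String) :=
  match d with
  | [] => []
  | p :: rest =>
    ((p :: rest).foldl (fun acc kv => (acc.1 ++ [(kv.1, acc.2)], kv.2))
      (([] : List (String × String)), ((p :: rest).getLast (by simp)).2)).1

-- ===== PRECONDITION & SPEC =====
def Spec_reverse_shift_dictionary_values (d : List (String × String)) (out : List (String × String)) : Prop := out = reverse_shift_dictionary_values_alt d
instance (d : List (String × String)) (out : List (String × String)) : Decidable (Spec_reverse_shift_dictionary_values d out) := by unfold Spec_reverse_shift_dictionary_values; infer_instance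

-- ===== CLAIM (what is proved, stated in full; the proofs are below) =====
def Claim_equal_reverse_shift_dictionary_values : Prop := ∀ (d : List (String × String)), Dom_reverse_shift_dictionary_values d → Spec_reverse_shift_dictionary_values d (reverse_shift_dictionary_values d)

-- ===== LEMMAS AND PROOFS =====

-- B's fold appends exactly the pairs (kᵢ, prevᵢ) where prev₀ is the seed and prevᵢ₊₁ = vᵢ
theorem pvFoldB (l : List (String × String)) (acc : List (String × String)) (prev : String) :
    (l.foldl (fun acc kv => (acc.1 ++ [(kv.1, acc.2)], kv.2)) (acc, prev)).1
      = acc ++ (l.map Prod.fst).zip (prev :: l.map Prod.snd) := by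
  induction l generalizing acc prev with
  | nil => simp
  | cons p t ih => simp [List.foldl_cons, ih]

-- A's indexed comprehension over range(len keys) is the zip of keys with shifted
theorem pvMapA (keys ys : List String) (h : keys.length ≤ ys.length) :
    ((List.range keys.length).map (fun k => ((k : Nat) : Int))).map
        (fun i => (PySem.List.pyGetD keys i "", PySem.List.pyGetD ys i ""))
      = keys.zip ys := by
  apply List.ext_getElem
  · simp [Nat.min_eq_left h]
  · intro i h1 h2
    have hi : i < keys.length := by simpa using h1
    have hy : i < ys.length := lt_of_lt_of_le hi h
    simp [PySem.List.pyGetD_natCast, hi, hy]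

theorem pvZipTrunc (keys ys : List String) (a : String) (h : keys.length ≤ ys.length) :
    keys.zip (a :: ys.dropLast) = keys.zip (a :: ys) := by
  apply List.ext_getElem
  · simp; omega
  · intro i h1 h2
    simp only [List.getElem_zip]
    congr 1
    rcases i with _ | j
    · rfl
    · have hj : j < ys.dropLast.length := by simp at h1 ⊢; omega
      simp [List.getElem_dropLast]

-- ===== VERDICT (by name: the statement is the Claim_ definition above) =====
theorem reverse_shift_dictionary_values_spec : Claim_equal_reverse_shift_dictionary_values := by
  intro d _
  unfold Spec_reverse_shift_dictionary_values
  match d with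
  | [] => rfl
  | p :: rest =>
    unfold reverse_shift_dictionary_values reverse_shift_dictionary_values_alt
    rw [if_neg (List.cons_ne_nil p rest)]
    dsimp only
    rw [pvFoldB]
    have hne : (p :: rest).map Prod.snd ≠ [] := by simp
    have hlast : PySem.List.pyGet? ((p :: rest).map Prod.snd) (-1)
        = some (((p :: rest).map Prod.snd).getLast hne) := by
      simp [PySem.List.pyGet?, PySem.List.pyIdx?, List.getLast_eq_getElem]
    rw [PySem.List.pyRange_zero_natCast, hlast, PySem.List.slice_to_neg_one]
    simp only [List.singleton_append]
    have hlen : ((p :: rest).map Prod.fst).length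
        ≤ (((p :: rest).map Prod.snd).getLast hne :: ((p :: rest).map Prod.snd).dropLast).length := by
      simp
    rw [pvMapA _ _ hlen, pvZipTrunc _ _ _ (by simp)]
    congr 1
    rw [List.getLast_map (f := Prod.snd) (by simp)]
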